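-- pv_equiv track=rewrite | github.com/leandro-bcamargo/trybe-exercicios | ciencia-da-computacao/bloco-03-estrutura-de-dados-1-listas-lineares/dia-02-arrays/exercicios/ex_01.py | max_stability_period
-- ===== SOURCE A (Python) =====
-- def max_stability_period(values):
--     string = str()
--     for value in values:
--         string += str(value)
--
--     list_stability_periods = [seq for seq in string.split("0") if seq]
--
--     max_length = 0
--     for item in list_stability_periods:
--         if len(item) > max_length:
--             max_length = len(item)
--
--     return max_length
-- ===== SOURCE B (Python) =====
-- def max_stability_period(values):
--     max_length = 0
--     current = 0
--     for value in values:
--         for ch in str(value):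
--             if ch == "0":
--                 current = 0
--             else:
--                 current += 1
--                 if current > max_length:
--                     max_length = current
--     return max_length
-- ===== Notes on version B (the rewrite author's own statement) =====
-- stated objective: simpler
-- what changed: B replaces build-string / split-on-'0' / filter / second max pass by one streaming pass over the digits of each value with a current-run counter and a running maximum, never materialising the concatenated string or the segment list.
import Mathlib
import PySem

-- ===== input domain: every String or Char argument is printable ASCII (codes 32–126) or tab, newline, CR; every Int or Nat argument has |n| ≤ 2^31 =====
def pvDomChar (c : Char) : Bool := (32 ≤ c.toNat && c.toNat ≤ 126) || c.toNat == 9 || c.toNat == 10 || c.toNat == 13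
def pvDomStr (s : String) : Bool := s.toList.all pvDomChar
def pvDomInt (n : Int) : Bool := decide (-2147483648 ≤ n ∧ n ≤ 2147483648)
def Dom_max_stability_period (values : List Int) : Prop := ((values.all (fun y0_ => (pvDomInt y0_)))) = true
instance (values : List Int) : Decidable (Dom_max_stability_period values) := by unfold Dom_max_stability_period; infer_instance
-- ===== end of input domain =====

-- B does one streaming pass (run counter + running max) instead of A's build-string / split / filter / max passes; same values, simpler.

-- ===== PORT A =====
def max_stability_period (values : List Int) : Int :=
  ((PySem.Chars.splitOn (values.foldl (fun s v => s ++ PySem.Int.toChars v) []) ['0']).filter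
      (fun seq => !seq.isEmpty)).foldl
    (fun max_length item =>
      if (item.length : Int) > max_length then (item.length : Int) else max_length) 0

-- ===== PORT B =====
-- one step of B's inner loop: state = (current, max_length)
def pvStep (st : Int × Int) (ch : Char) : Int × Int :=
  if ch = '0' then (0, st.2)
  else
    let cur := st.1 + 1
    (cur, if cur > st.2 then cur else st.2)

def max_stability_period_alt (values : List Int) : Int :=
  (values.foldl (fun st v => (PySem.Int.toChars v).foldl pvStep st) (0, 0)).2

-- ===== PRECONDITION & SPEC =====
def Spec_max_stability_period (values : List Int) (out : Int) : Prop := out = max_stability_period_alt values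
instance (values : List Int) (out : Int) : Decidable (Spec_max_stability_period values out) := by unfold Spec_max_stability_period; infer_instance

-- ===== CLAIM (what is proved, stated in full; the proofs are below) =====
def Claim_equal_max_stability_period : Prop := ∀ (values : List Int), Dom_max_stability_period values → Spec_max_stability_period values (max_stability_period values)

-- ===== LEMMAS AND PROOFS =====

-- structural split on '0': (first segment, remaining segments)
def pvSplit0 : List Char → List Char × List (List Char)
  | [] => ([], [])
  | c :: rest =>
    let r := pvSplit0 rest
    if c = '0' then ([], r.1 :: r.2) else (c :: r.1, r.2)

theorem pv_go_char (fuel : Nat) :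
    ∀ (l cur : List Char) (acc : List (List Char)), l.length < fuel →
      PySem.Chars.splitOn.go ['0'] fuel l cur acc =
        acc.reverse ++ (cur.reverse ++ (pvSplit0 l).1) :: (pvSplit0 l).2 := by
  induction fuel with
  | zero => intro l cur acc h; omega
  | succ n ih =>
    intro l cur acc h
    cases l with
    | nil => simp [PySem.Chars.splitOn.go, pvSplit0]
    | cons c rest =>
      rw [PySem.Chars.splitOn.go]
      by_cases hc : c = '0'
      · subst hc
        have hp : List.isPrefixOf ['0'] ('0' :: rest) = true := by
          simp [List.isPrefixOf]
        simp only [hp, if_true, List.length_cons, List.length_nil, List.drop_succ_cons,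
          List.drop_zero]
        rw [ih rest [] (cur.reverse :: acc) (by simpa using Nat.lt_of_succ_lt_succ h)]
        simp [pvSplit0]
      · have hp : List.isPrefixOf ['0'] (c :: rest) = false := by
          simp [List.isPrefixOf]; exact fun h' => (hc h'.symm).elim
        simp only [hp, Bool.false_eq_true, if_false]
        rw [ih rest (c :: cur) acc (by simpa using Nat.lt_of_succ_lt_succ h)]
        simp [pvSplit0, hc]

theorem pv_splitOn_eq (cs : List Char) :
    PySem.Chars.splitOn cs ['0'] = (pvSplit0 cs).1 :: (pvSplit0 cs).2 := by
  unfold PySem.Chars.splitOn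
  rw [pv_go_char (cs.length + 1) cs [] [] (by omega)]
  simp

-- the if-step is max
theorem pv_if_eq_max (m a : Int) : (if a > m then a else m) = m ⊔ a := by
  rcases le_total a m with h | h
  · rw [if_neg (not_lt.mpr h), sup_eq_left.mpr h]
  · rcases lt_or_eq_of_le h with h' | h'
    · rw [if_pos h', sup_eq_right.mpr h]
    · subst h'; simp

theorem pv_foldl_if_eq_max (l : List (List Char)) : ∀ (m : Int),
    l.foldl (fun max_length item =>
        if (item.length : Int) > max_length then (item.length : Int) else max_length) m
      = (l.map (fun p => (p.length : Int))).foldl (· ⊔ ·) m := by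
  induction l with
  | nil => intro m; rfl
  | cons p ps ih =>
    intro m
    simp only [List.foldl_cons, List.map_cons]
    rw [pv_if_eq_max]
    exact ih _

-- dropping empty segments does not change the max fold (init ≥ 0)
theorem pv_filter_irrelevant (l : List (List Char)) : ∀ (m : Int), 0 ≤ m →
    ((l.filter (fun seq => !seq.isEmpty)).map (fun p => (p.length : Int))).foldl (· ⊔ ·) m
      = (l.map (fun p => (p.length : Int))).foldl (· ⊔ ·) m := by
  induction l with
  | nil => intro m _; rfl
  | cons p ps ih =>
    intro m hm
    by_cases hp : p.isEmpty
    · have hlen : p.length = 0 := by simpa [List.isEmpty_iff_length_eq_zero] using hp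
      simp only [List.filter_cons, hp, Bool.not_true, Bool.false_eq_true, if_false,
        List.map_cons, List.foldl_cons, hlen]
      rw [show (m ⊔ ((0 : Nat) : Int)) = m by push_cast; omega]
      exact ih m hm
    · simp only [List.filter_cons, hp, Bool.not_false, if_true, List.map_cons, List.foldl_cons]
      exact ih _ (le_trans hm le_sup_left)

theorem pvSplit0_cons_zero (rest : List Char) :
    pvSplit0 ('0' :: rest) = ([], (pvSplit0 rest).1 :: (pvSplit0 rest).2) := by
  simp [pvSplit0]

theorem pvSplit0_cons_ne (c : Char) (rest : List Char) (hc : c ≠ '0') :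
    pvSplit0 (c :: rest) = (c :: (pvSplit0 rest).1, (pvSplit0 rest).2) := by
  simp [pvSplit0, hc]

-- the core relation between B's streaming fold and the split segments
theorem pv_key (cs : List Char) : ∀ (cur m : Int), 0 ≤ cur → cur ≤ m →
    (cs.foldl pvStep (cur, m)).2
      = ((pvSplit0 cs).2.map (fun p => (p.length : Int))).foldl (· ⊔ ·)
          (m ⊔ (cur + (pvSplit0 cs).1.length)) := by
  induction cs with
  | nil =>
    intro cur m h0 hm
    simp [pvSplit0]
    omega
  | cons c rest ih =>
    intro cur m h0 hm
    by_cases hc : c = '0'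
    · subst hc
      rw [List.foldl_cons, show pvStep (cur, m) '0' = (0, m) by simp [pvStep]]
      rw [ih 0 m le_rfl (le_trans h0 hm), pvSplit0_cons_zero]
      simp only [List.map_cons, List.foldl_cons, List.length_nil]
      congr 1
      push_cast
      omega
    · rw [List.foldl_cons,
        show pvStep (cur, m) c = (cur + 1, if cur + 1 > m then cur + 1 else m) by
          simp [pvStep, hc]]
      rw [ih (cur + 1) (if cur + 1 > m then cur + 1 else m)
          (by omega) (by rw [pv_if_eq_max]; exact le_sup_right)]
      rw [pvSplit0_cons_ne c rest hc]
      simp only [List.length_cons]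
      congr 1
      rw [pv_if_eq_max]
      push_cast
      omega

theorem pv_foldl_append_chars (values : List Int) : ∀ (s : List Char),
    values.foldl (fun s v => s ++ PySem.Int.toChars v) s = s ++ values.flatMap PySem.Int.toChars := by
  induction values with
  | nil => intro s; simp
  | cons v vs ih => intro s; simp [List.flatMap_cons, ih]

theorem pv_foldl_flat (values : List Int) : ∀ (st : Int × Int),
    values.foldl (fun st v => (PySem.Int.toChars v).foldl pvStep st) st
      = (values.flatMap PySem.Int.toChars).foldl pvStep st := by
  induction values with
  | nil => intro st; rfl
  | cons v vs ih => intro st; simp [List.flatMap_cons, List.foldl_append, ih]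

-- ===== VERDICT (by name: the statement is the Claim_ definition above) =====
theorem max_stability_period_spec : Claim_equal_max_stability_period := by
  intro values _
  unfold Spec_max_stability_period max_stability_period max_stability_period_alt
  rw [pv_foldl_append_chars values [], pv_foldl_flat values (0, 0), List.nil_append]
  set cs := values.flatMap PySem.Int.toChars with hcs
  rw [pv_key cs 0 0 le_rfl le_rfl]
  rw [pv_splitOn_eq cs]
  rw [pv_foldl_if_eq_max]
  rw [pv_filter_irrelevant _ 0 le_rfl]
  simp only [List.map_cons, List.foldl_cons]
  congr 1
  omega
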